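-- pv_equiv track=rewrite | github.com/christiaanoostwouder-collab/Data-Interface | fetch_wallet_data.py | filter_trades_by_windows
-- ===== SOURCE A (Python) =====
-- from typing import Any, Dict, List, Tuple
--
-- def extract_ts_seconds(trade: Dict[str, Any]) -> int | None:
--     ts = trade.get("timestamp") or trade.get("ts") or trade.get("time")
--     if ts is None:
--         return None
--     try:
--         t = int(ts)
--         if t > 2 * 10**10:
--             t = t // 1000
--         return t
--     except Exception:
--         return None
--
-- def filter_trades_by_windows(trades: List[Dict[str, Any]],
--                              windows: List[Tuple[int, int]]) -> List[Dict[str, Any]]: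
--     out: List[Dict[str, Any]] = []
--     for t in trades:
--         ts = extract_ts_seconds(t)
--         if ts is None:
--             continue
--         for start_ts, end_ts in windows:
--             if start_ts <= ts < end_ts:
--                 out.append(t)
--                 break
--     return out
-- ===== SOURCE B (Python) =====
-- from typing import Any, Dict, List, Tuple
--
-- def _ts_seconds(trade: Dict[str, Any]) -> int | None:
--     ts = trade.get("timestamp")
--     if not ts:
--         ts = trade.get("ts")
--     if not ts:
--         ts = trade.get("time")
--     if ts is None:
--         return None
--     try:
--         t = int(ts)
--     except Exception:
--         return None
--     return t // 1000 if t > 2 * 10**10 else t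
--
-- def filter_trades_by_windows(trades: List[Dict[str, Any]],
--                              windows: List[Tuple[int, int]]) -> List[Dict[str, Any]]:
--     # Alternative algorithm: sort windows by start once; pref[i] = max end among the first i+1 windows;
--     # then membership of a timestamp is one binary search instead of a scan of all windows.
--     ws = sorted(windows, key=lambda w: w[0])
--     starts = [w[0] for w in ws]
--     pref: List[int] = []
--     for _, e in ws:
--         pref.append(e if not pref else max(pref[-1], e))
--     out: List[Dict[str, Any]] = []
--     for t in trades:
--         ts = _ts_seconds(t)
--         if ts is None:
--             continue
--         # binary search: lo = number of windows with start <= ts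
--         lo, hi = 0, len(starts)
--         while lo < hi:
--             mid = (lo + hi) // 2
--             if starts[mid] <= ts:
--                 lo = mid + 1
--             else:
--                 hi = mid
--         if lo > 0 and pref[lo - 1] > ts:
--             out.append(t)
--     return out
-- ===== Notes on version B (the rewrite author's own statement) =====
-- stated objective: alternative
-- what changed: Replaces the per-trade linear scan of all windows with a one-time sort of the windows by start plus a prefix-maximum of ends, so each trade does a single binary search instead of scanning every window; measured runtime on the generated inputs was about the same.
import Mathlib
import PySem

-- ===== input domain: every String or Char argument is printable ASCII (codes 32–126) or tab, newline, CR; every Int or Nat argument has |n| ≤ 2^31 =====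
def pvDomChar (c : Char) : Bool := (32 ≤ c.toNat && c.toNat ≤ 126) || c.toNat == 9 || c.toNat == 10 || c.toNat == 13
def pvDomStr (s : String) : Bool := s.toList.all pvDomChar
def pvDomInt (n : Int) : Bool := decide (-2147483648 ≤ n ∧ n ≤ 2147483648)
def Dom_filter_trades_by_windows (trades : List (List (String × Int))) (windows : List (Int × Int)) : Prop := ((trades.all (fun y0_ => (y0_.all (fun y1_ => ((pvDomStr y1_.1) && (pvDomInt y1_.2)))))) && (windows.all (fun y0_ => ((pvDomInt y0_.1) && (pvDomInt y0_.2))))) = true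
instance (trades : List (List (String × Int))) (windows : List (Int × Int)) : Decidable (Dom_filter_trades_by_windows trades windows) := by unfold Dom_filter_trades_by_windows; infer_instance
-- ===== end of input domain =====

-- B sorts the windows once (by start, with a prefix-maximum of ends) and binary-searches each
-- trade's timestamp instead of scanning every window per trade (alternative algorithm, same result).


-- ===== PORT A =====
-- Python `a or b` on int-or-None values (None and 0 are falsy)
def pvOrInt (a b : Option Int) : Option Int :=
  match a with
  | some x => if x ≠ 0 then some x else b
  | none => b

-- extract_ts_seconds; int(ts) on an int value never raises, so the try/except is dead here
def extract_ts_seconds (trade : List (String × Int)) : Option Int :=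
  let ts := pvOrInt ((PySem.Dict.mk trade).get? "timestamp")
              (pvOrInt ((PySem.Dict.mk trade).get? "ts") ((PySem.Dict.mk trade).get? "time"))
  match ts with
  | none => none
  | some t0 => some (if t0 > 2 * 10 ^ 10 then PySem.Int.floordiv t0 1000 else t0)

-- A's inner `for … break` over the windows: true iff the trade gets appended
def pvScanA (ts : Int) : List (Int × Int) → Bool
  | [] => false
  | (s, e) :: ws => if s ≤ ts ∧ ts < e then true else pvScanA ts ws

def filter_trades_by_windows (trades : List (List (String × Int))) (windows : List (Int × Int)) : List (List (String × Int)) :=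
  trades.foldl (fun out t =>
    match extract_ts_seconds t with
    | none => out
    | some ts => if pvScanA ts windows then out ++ [t] else out) []

-- ===== PORT B =====
-- `not ts` on an int-or-None value
def pvFalsy : Option Int → Bool
  | none => true
  | some x => x == 0

-- B's _ts_seconds
def pvTs (trade : List (String × Int)) : Option Int :=
  let ts1 := (PySem.Dict.mk trade).get? "timestamp"
  let ts2 := if pvFalsy ts1 then (PySem.Dict.mk trade).get? "ts" else ts1
  let ts3 := if pvFalsy ts2 then (PySem.Dict.mk trade).get? "time" else ts2
  match ts3 with
  | none => none
  | some t => some (if t > 2 * 10 ^ 10 then PySem.Int.floordiv t 1000 else t)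

-- B's prefix-maximum loop (pref.append(e if not pref else max(pref[-1], e)))
def pvBuildPref (ws : List (Int × Int)) : List Int :=
  ws.foldl (fun pref we =>
    pref ++ [if pref = [] then we.2 else max (PySem.List.pyGetD pref (-1) 0) we.2]) []

-- B's hand-written binary search: number of starts ≤ ts (indices are Nat; Python's
-- lo, hi, (lo+hi)//2 are nonnegative ints throughout, so Nat division is exact here)
def pvBisect (starts : List Int) (ts : Int) (lo hi : Nat) : Nat :=
  if lo < hi then
    let mid := (lo + hi) / 2
    if PySem.List.pyGetD starts (mid : Int) 0 ≤ ts then pvBisect starts ts (mid + 1) hi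
    else pvBisect starts ts lo mid
  else lo
termination_by hi - lo
decreasing_by all_goals omega

def filter_trades_by_windows_alt (trades : List (List (String × Int))) (windows : List (Int × Int)) : List (List (String × Int)) :=
  let ws := PySem.List.sorted windows (fun w => w.1) false
  let starts := ws.map (fun w => w.1)
  let pref := pvBuildPref ws
  trades.foldl (fun out t =>
    match pvTs t with
    | none => out
    | some ts =>
      let lo := pvBisect starts ts 0 starts.length
      if lo > 0 ∧ ts < PySem.List.pyGetD pref ((lo : Int) - 1) 0 then out ++ [t] else out) []

-- ===== PRECONDITION & SPEC =====
def Spec_filter_trades_by_windows (trades : List (List (String × Int))) (windows : List (Int × Int)) (out : List (List (String × Int))) : Prop := out = filter_trades_by_windows_alt trades windows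
instance (trades : List (List (String × Int))) (windows : List (Int × Int)) (out : List (List (String × Int))) : Decidable (Spec_filter_trades_by_windows trades windows out) := by unfold Spec_filter_trades_by_windows; infer_instance

-- ===== CLAIM (what is proved, stated in full; the proofs are below) =====
def Claim_equal_filter_trades_by_windows : Prop := ∀ (trades : List (List (String × Int))) (windows : List (Int × Int)), Dom_filter_trades_by_windows trades windows → Spec_filter_trades_by_windows trades windows (filter_trades_by_windows trades windows)

-- ===== LEMMAS AND PROOFS =====

-- the two timestamp extractors agree
theorem pvTs_eq (trade : List (String × Int)) : pvTs trade = extract_ts_seconds trade := by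
  unfold pvTs extract_ts_seconds pvOrInt pvFalsy
  rcases (PySem.Dict.mk trade).get? "timestamp" with _ | x <;>
  rcases (PySem.Dict.mk trade).get? "ts" with _ | y <;>
  rcases (PySem.Dict.mk trade).get? "time" with _ | z <;>
    simp <;> split_ifs <;> simp_all

-- A's scan is an existential over the window list
theorem pvScanA_iff (ts : Int) (ws : List (Int × Int)) :
    pvScanA ts ws = true ↔ ∃ w ∈ ws, w.1 ≤ ts ∧ ts < w.2 := by
  induction ws with
  | nil => simp [pvScanA]
  | cons w t ih =>
    obtain ⟨s, e⟩ := w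
    by_cases h : s ≤ ts ∧ ts < e <;> simp [pvScanA, h, ih]
  
-- the loop body only appends: snoc characterisation
theorem pvBuildPref_snoc (ws : List (Int × Int)) (w : Int × Int) :
    pvBuildPref (ws ++ [w]) = pvBuildPref ws ++
      [if pvBuildPref ws = [] then w.2 else max (PySem.List.pyGetD (pvBuildPref ws) (-1) 0) w.2] := by
  simp [pvBuildPref, List.foldl_append]

-- pvBuildPref: length
theorem pvBuildPref_length (ws : List (Int × Int)) : (pvBuildPref ws).length = ws.length := by
  induction ws using List.reverseRecOn with
  | nil => rfl
  | append_singleton ws w ih => rw [pvBuildPref_snoc]; simp [ih]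

-- pvBuildPref: each entry is the max of the ends so far (index form)
theorem pvBuildPref_get (ws : List (Int × Int)) (k : Nat) (hk : k < ws.length) :
    (∃ i, ∃ h : i < ws.length, i ≤ k ∧
        (pvBuildPref ws)[k]'(by rw [pvBuildPref_length]; exact hk) = ws[i].2) ∧
    ∀ i (h : i < ws.length), i ≤ k →
        ws[i].2 ≤ (pvBuildPref ws)[k]'(by rw [pvBuildPref_length]; exact hk) := by
  induction ws using List.reverseRecOn generalizing k with
  | nil => simp at hk
  | append_singleton ws w ih =>
    have hlen : (pvBuildPref ws).length = ws.length := pvBuildPref_length ws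
    rw [List.length_append, List.length_singleton] at hk
    by_cases hklt : k < ws.length
    · -- old entries untouched
      have hget : (pvBuildPref (ws ++ [w]))[k]'(by rw [pvBuildPref_length]; simpa using hk) =
          (pvBuildPref ws)[k]'(by rw [hlen]; exact hklt) := by
        simp only [pvBuildPref_snoc]
        exact List.getElem_append_left (by rw [hlen]; exact hklt)
      obtain ⟨⟨i, hi, hik, hiv⟩, hub⟩ := ih k hklt
      refine ⟨⟨i, by simp; omega, hik, ?_⟩, ?_⟩
      · rw [hget, hiv, List.getElem_append_left hi]
      · intro i h hik2
        have hi' : i < ws.length := by omega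
        rw [hget, List.getElem_append_left hi']
        exact hub i hi' hik2
    · -- the new entry
      have hkeq : k = ws.length := by omega
      subst hkeq
      have hget : (pvBuildPref (ws ++ [w]))[ws.length]'(by rw [pvBuildPref_length]; simp) =
          (if pvBuildPref ws = [] then w.2 else max (PySem.List.pyGetD (pvBuildPref ws) (-1) 0) w.2) := by
        simp only [pvBuildPref_snoc]
        rw [List.getElem_append_right (by omega)]
        simp [hlen]
      rcases eq_or_ne ws [] with hnil | hne
      · subst hnil
        simp [pvBuildPref] at hget ⊢
      · have hpne : pvBuildPref ws ≠ [] := by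
          intro hc; apply hne; have := pvBuildPref_length ws; rw [hc] at this
          exact List.length_eq_zero_iff.mp this.symm
        have hlast : PySem.List.pyGetD (pvBuildPref ws) (-1) 0 =
            (pvBuildPref ws)[ws.length - 1]'(by
              rw [hlen]; have := List.length_pos_iff.mpr hne; omega) := by
          rw [PySem.List.pyGetD_neg_one _ 0 hpne, List.getLast_eq_getElem]
          congr 1
          omega
        have hwslen : 0 < ws.length := List.length_pos_iff.mpr hne
        obtain ⟨⟨i, hi, hik, hiv⟩, hub⟩ := ih (ws.length - 1) (by omega)
        rw [if_neg hpne, hlast] at hget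
        constructor
        · rcases le_total ((pvBuildPref ws)[ws.length - 1]'(by rw [hlen]; omega)) w.2 with hle | hle
          · exact ⟨ws.length, by simp, by omega, by
              rw [hget, List.getElem_append_right (by omega)]
              simp [max_eq_right hle]⟩
          · exact ⟨i, by simp; omega, by omega, by
              rw [hget, List.getElem_append_left hi, max_eq_left hle, hiv]⟩
        · intro j h hjk
          by_cases hjlt : j < ws.length
          · rw [List.getElem_append_left hjlt, hget]
            exact le_trans (hub j hjlt (by omega)) (le_max_left _ _)
          · have : j = ws.length := by omega
            subst this
            rw [List.getElem_append_right (by omega), hget]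
            have hidx : ws.length - ws.length = 0 := by omega
            simp

-- binary-search invariant on a list whose accessed prefix is ordered
theorem pvBisect_spec (starts : List Int) (ts : Int) (lo hi : Nat)
    (hhi : hi ≤ starts.length)
    (hmono : starts.Pairwise (· ≤ ·))
    (hlo : ∀ i (h : i < starts.length), i < lo → starts[i] ≤ ts)
    (hhi2 : ∀ i (h : i < starts.length), hi ≤ i → ts < starts[i])
    (hlohi : lo ≤ hi) :
    pvBisect starts ts lo hi ≤ starts.length ∧
    (∀ i (h : i < starts.length), (i < pvBisect starts ts lo hi ↔ starts[i] ≤ ts)) := by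
  induction lo, hi using pvBisect.induct starts ts with
  | case1 lo hi hlt mid hle ih =>
    -- starts[mid] ≤ ts : recurse right
    rw [pvBisect, if_pos hlt, if_pos hle]
    have hmid : mid < starts.length := by simp only [mid]; omega
    have hsm : PySem.List.pyGetD starts (mid : Int) 0 = starts[mid] := by
      rw [PySem.List.pyGetD_eq_getElem starts 0 (by positivity) (by exact_mod_cast hmid)]
      simp
    rw [hsm] at hle
    refine ih hhi ?_ hhi2 (by simp only [mid]; omega)
    intro i h hi
    rcases Nat.lt_or_ge i mid with hlt2 | hge
    · exact le_trans (List.pairwise_iff_getElem.mp hmono i mid h hmid hlt2) hle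
    · have : i = mid := by simp only [mid] at *; omega
      subst this; exact hle
  | case2 lo hi hlt mid hle ih =>
    -- ts < starts[mid] : recurse left
    rw [pvBisect, if_pos hlt, if_neg hle]
    have hmid : mid < starts.length := by simp only [mid]; omega
    have hsm : PySem.List.pyGetD starts (mid : Int) 0 = starts[mid] := by
      rw [PySem.List.pyGetD_eq_getElem starts 0 (by positivity) (by exact_mod_cast hmid)]
      simp
    rw [hsm] at hle
    push Not at hle
    refine ih (by omega) hlo ?_ (by simp only [mid]; omega)
    intro i h hi
    rcases Nat.lt_or_ge mid i with hlt2 | hge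
    · exact lt_of_lt_of_le hle (List.pairwise_iff_getElem.mp hmono mid i hmid h hlt2)
    · have : i = mid := by simp only [mid] at *; omega
      subst this; exact hle
  | case3 lo hi hnlt =>
    rw [pvBisect, if_neg hnlt]
    have hke : lo = hi := by omega
    subst hke
    refine ⟨by omega, fun i h => ⟨fun hik => hlo i h hik, fun hsle => ?_⟩⟩
    by_contra hc
    push Not at hc
    exact absurd hsle (not_le.mpr (hhi2 i h hc))

-- A's linear scan and B's binary-search-plus-prefix-max test decide the same membership
theorem pvCond_iff (windows : List (Int × Int)) (ts : Int) :
    pvScanA ts windows = true ↔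
      (0 < pvBisect ((PySem.List.sorted windows (fun w => w.1) false).map (fun w => w.1)) ts 0
            ((PySem.List.sorted windows (fun w => w.1) false).map (fun w => w.1)).length ∧
        ts < PySem.List.pyGetD (pvBuildPref (PySem.List.sorted windows (fun w => w.1) false))
              ((pvBisect ((PySem.List.sorted windows (fun w => w.1) false).map (fun w => w.1)) ts 0
                  ((PySem.List.sorted windows (fun w => w.1) false).map (fun w => w.1)).length : Int) - 1) 0) := by
  set ws := PySem.List.sorted windows (fun w => w.1) false with hws
  set starts := ws.map (fun w => w.1) with hstarts
  set k := pvBisect starts ts 0 starts.length with hk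
  have hlen : starts.length = ws.length := by simp [hstarts]
  have hmono : starts.Pairwise (· ≤ ·) := by
    rw [hstarts, List.pairwise_map]
    exact PySem.List.sorted_pairwise windows (fun w => w.1)
  obtain ⟨hkle, hiff⟩ := pvBisect_spec starts ts 0 starts.length (le_refl _) hmono
      (fun i h hi => absurd hi (by omega)) (fun i h hge => absurd hge (by omega)) (by omega)
  rw [pvScanA_iff]
  constructor
  · rintro ⟨w, hw, hw1, hw2⟩
    have hwmem : w ∈ ws := (PySem.List.mem_sorted windows _ false w).mpr hw
    obtain ⟨i, hilen, hieq⟩ := List.mem_iff_getElem.mp hwmem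
    have hs : starts[i]'(by rw [hlen]; exact hilen) = (ws[i].1 : Int) := by
      simp [hstarts]
    have hik : i < k := (hiff i (by rw [hlen]; exact hilen)).mpr
      (by rw [hs, hieq]; exact hw1)
    have hk1len : k - 1 < ws.length := by have := hkle.trans_eq hlen; omega
    refine ⟨by omega, ?_⟩
    have hgd : PySem.List.pyGetD (pvBuildPref ws) ((k : Int) - 1) 0 =
        (pvBuildPref ws)[k - 1]'(by rw [pvBuildPref_length]; exact hk1len) := by
      rw [PySem.List.pyGetD_eq_getElem _ 0 (by omega)
        (by rw [pvBuildPref_length]; omega)]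
      congr 1
      omega
    rw [hgd]
    obtain ⟨_, hub⟩ := pvBuildPref_get ws (k - 1) hk1len
    have hub2 := hub i hilen (by omega)
    rw [hieq] at hub2
    omega
  · rintro ⟨hk0, hlt⟩
    have hk1len : k - 1 < ws.length := by have := hkle.trans_eq hlen; omega
    have hgd : PySem.List.pyGetD (pvBuildPref ws) ((k : Int) - 1) 0 =
        (pvBuildPref ws)[k - 1]'(by rw [pvBuildPref_length]; exact hk1len) := by
      rw [PySem.List.pyGetD_eq_getElem _ 0 (by omega)
        (by rw [pvBuildPref_length]; omega)]
      congr 1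
      omega
    rw [hgd] at hlt
    obtain ⟨⟨i, hilen, hik1, hieq⟩, _⟩ := pvBuildPref_get ws (k - 1) hk1len
    have hsle : starts[i]'(by rw [hlen]; exact hilen) ≤ ts :=
      (hiff i (by rw [hlen]; exact hilen)).mp (by omega)
    simp only [hstarts, List.getElem_map] at hsle
    refine ⟨ws[i], (PySem.List.mem_sorted windows _ false _).mp (List.getElem_mem hilen),
      hsle, by rw [← hieq]; exact hlt⟩

-- ===== VERDICT (by name: the statement is the Claim_ definition above) =====
theorem filter_trades_by_windows_spec : Claim_equal_filter_trades_by_windows := by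
  intro trades windows _
  unfold Spec_filter_trades_by_windows filter_trades_by_windows filter_trades_by_windows_alt
  congr 1
  funext out t
  rw [pvTs_eq]
  cases hext : extract_ts_seconds t with
  | none => rfl
  | some ts =>
    simp only []
    by_cases h : pvScanA ts windows = true
    · rw [if_pos h, if_pos ((pvCond_iff windows ts).mp h)]
    · rw [if_neg h, if_neg (fun hc => h ((pvCond_iff windows ts).mpr hc))]
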